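-- pv_equiv track=rewrite | github.com/sabi-h/qpyr | qpyr/_lib/draw.py | _finder_and_seperator_pattern_generator
-- ===== SOURCE A (Python) =====
-- from typing import Callable, Dict, List, Optional, Tuple
--
-- CoordinateValueMap = Dict[Tuple[int, int], int]
--
-- WHITE = 0
--
-- BLACK = 1
--
-- def _finder_and_seperator_pattern_generator(row, col, grid_size) -> CoordinateValueMap:
--     result = {}
--     for r in range(-1, 8):
--         if row + r <= -1 or grid_size <= row + r:
--             continue
--
--         for c in range(-1, 8):
--             if col + c <= -1 or grid_size <= col + c:
--                 continue
--
--             if (0 <= r <= 6 and c in (0, 6)) or (0 <= c <= 6 and r in (0, 6)) or (2 <= r <= 4 and 2 <= c <= 4):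
--                 result[(row + r, col + c)] = BLACK
--             else:
--                 result[(row + r, col + c)] = WHITE
--     return result
-- ===== SOURCE B (Python) =====
-- WHITE = 0
-- BLACK = 1
--
--
-- def _finder_and_seperator_pattern_generator(row, col, grid_size):
--     def in_bounds(y, x):
--         return 0 <= y < grid_size and 0 <= x < grid_size
--
--     result = {}
--     # pass 1: paint the whole 9x9 region (separator background) white
--     for r in range(-1, 8):
--         for c in range(-1, 8):
--             if in_bounds(row + r, col + c):
--                 result[(row + r, col + c)] = WHITE
--     # pass 2: stamp the 7x7 finder pattern black (overwrite keeps dict order)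
--     for r in range(7):
--         for c in range(7):
--             if r in (0, 6) or c in (0, 6) or (2 <= r <= 4 and 2 <= c <= 4):
--                 if in_bounds(row + r, col + c):
--                     result[(row + r, col + c)] = BLACK
--     return result
-- ===== Notes on version B (the rewrite author's own statement) =====
-- stated objective: simpler
-- what changed: Replaces A's single nested scan with per-cell black/white classification by two differently-shaped passes: a 9x9 white background fill and then a 7x7 black finder-pattern stamp that overwrites in place, relying on dict overwrite keeping insertion order.
import Mathlib
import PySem

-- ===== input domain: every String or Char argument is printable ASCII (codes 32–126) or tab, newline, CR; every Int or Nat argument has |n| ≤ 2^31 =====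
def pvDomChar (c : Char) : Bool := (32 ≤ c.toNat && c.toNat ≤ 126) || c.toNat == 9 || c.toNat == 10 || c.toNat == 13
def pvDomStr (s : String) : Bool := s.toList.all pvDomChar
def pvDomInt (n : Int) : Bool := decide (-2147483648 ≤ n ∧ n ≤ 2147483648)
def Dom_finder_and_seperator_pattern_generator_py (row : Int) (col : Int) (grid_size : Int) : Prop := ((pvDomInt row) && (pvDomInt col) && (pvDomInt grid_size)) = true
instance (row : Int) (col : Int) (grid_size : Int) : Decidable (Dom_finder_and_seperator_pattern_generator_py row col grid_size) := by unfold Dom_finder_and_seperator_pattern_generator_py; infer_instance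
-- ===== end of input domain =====

-- B replaces A's single per-cell-classifying scan by a white background fill followed by a black finder-pattern stamp (simpler decomposition; same cost).

-- ===== PORT A =====
def finder_and_seperator_pattern_generator_py (row : Int) (col : Int) (grid_size : Int) : List (Int × Int × Int) :=
  ((PySem.List.pyRange (-1) 8 1).foldl (fun result r =>
      if row + r ≤ -1 ∨ grid_size ≤ row + r then result
      else
        (PySem.List.pyRange (-1) 8 1).foldl (fun result c =>
          if col + c ≤ -1 ∨ grid_size ≤ col + c then result
          else if (0 ≤ r ∧ r ≤ 6 ∧ (c = 0 ∨ c = 6)) ∨ (0 ≤ c ∧ c ≤ 6 ∧ (r = 0 ∨ r = 6)) ∨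
                  (2 ≤ r ∧ r ≤ 4 ∧ 2 ≤ c ∧ c ≤ 4) then
            result.insert (row + r, col + c) 1
          else
            result.insert (row + r, col + c) 0) result)
      (PySem.Dict.empty : PySem.Dict (Int × Int) Int)).items.map (fun kv => (kv.1.1, kv.1.2, kv.2))

-- ===== PORT B =====
-- pass 1: paint the whole 9x9 region (separator background) white;
-- pass 2: stamp the 7x7 finder pattern black (overwrite keeps dict order)
def finder_and_seperator_pattern_generator_py_alt (row : Int) (col : Int) (grid_size : Int) : List (Int × Int × Int) :=
  ((PySem.List.pyRange 0 7 1).foldl (fun result r =>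
      (PySem.List.pyRange 0 7 1).foldl (fun result c =>
        if (r = 0 ∨ r = 6) ∨ (c = 0 ∨ c = 6) ∨ (2 ≤ r ∧ r ≤ 4 ∧ 2 ≤ c ∧ c ≤ 4) then
          if 0 ≤ row + r ∧ row + r < grid_size ∧ 0 ≤ col + c ∧ col + c < grid_size then
            result.insert (row + r, col + c) 1
          else result
        else result) result)
      ((PySem.List.pyRange (-1) 8 1).foldl (fun result r =>
        (PySem.List.pyRange (-1) 8 1).foldl (fun result c =>
          if 0 ≤ row + r ∧ row + r < grid_size ∧ 0 ≤ col + c ∧ col + c < grid_size then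
            result.insert (row + r, col + c) 0
          else result) result)
        (PySem.Dict.empty : PySem.Dict (Int × Int) Int))).items.map (fun kv => (kv.1.1, kv.1.2, kv.2))

-- ===== PRECONDITION & SPEC =====
def Spec_finder_and_seperator_pattern_generator_py (row : Int) (col : Int) (grid_size : Int) (out : List (Int × Int × Int)) : Prop := out = finder_and_seperator_pattern_generator_py_alt row col grid_size
instance (row : Int) (col : Int) (grid_size : Int) (out : List (Int × Int × Int)) : Decidable (Spec_finder_and_seperator_pattern_generator_py row col grid_size out) := by unfold Spec_finder_and_seperator_pattern_generator_py; infer_instance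

-- ===== CLAIM (what is proved, stated in full; the proofs are below) =====
def Claim_equal_finder_and_seperator_pattern_generator_py : Prop := ∀ (row : Int) (col : Int) (grid_size : Int), Dom_finder_and_seperator_pattern_generator_py row col grid_size → Spec_finder_and_seperator_pattern_generator_py row col grid_size (finder_and_seperator_pattern_generator_py row col grid_size)

-- ===== LEMMAS AND PROOFS =====

-- proof-side abbreviations
def pvKey (row col : Int) (a : Int × Int) : Int × Int := (row + a.1, col + a.2)
def pvInb (row col grid_size : Int) (a : Int × Int) : Bool :=
  decide (0 ≤ row + a.1 ∧ row + a.1 < grid_size ∧ 0 ≤ col + a.2 ∧ col + a.2 < grid_size)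
def pvGeomA (a : Int × Int) : Bool :=
  decide ((0 ≤ a.1 ∧ a.1 ≤ 6 ∧ (a.2 = 0 ∨ a.2 = 6)) ∨ (0 ≤ a.2 ∧ a.2 ≤ 6 ∧ (a.1 = 0 ∨ a.1 = 6)) ∨
          (2 ≤ a.1 ∧ a.1 ≤ 4 ∧ 2 ≤ a.2 ∧ a.2 ≤ 4))
def pvGeomB (a : Int × Int) : Bool :=
  decide ((a.1 = 0 ∨ a.1 = 6) ∨ (a.2 = 0 ∨ a.2 = 6) ∨ (2 ≤ a.1 ∧ a.1 ≤ 4 ∧ 2 ≤ a.2 ∧ a.2 ≤ 4))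
def pvValA (a : Int × Int) : Int := if pvGeomA a then 1 else 0
def pvPairs (l₁ l₂ : List Int) : List (Int × Int) := l₁.flatMap (fun r => l₂.map (fun c => (r, c)))
def pvP81 : List (Int × Int) := pvPairs [-1,0,1,2,3,4,5,6,7] [-1,0,1,2,3,4,5,6,7]
def pvP49 : List (Int × Int) := pvPairs [0,1,2,3,4,5,6] [0,1,2,3,4,5,6]
def pvStepA (row col grid_size : Int) (d : PySem.Dict (Int × Int) Int) (a : Int × Int) : PySem.Dict (Int × Int) Int :=
  if pvInb row col grid_size a then d.insert (pvKey row col a) (pvValA a) else d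
def pvStep1 (row col grid_size : Int) (d : PySem.Dict (Int × Int) Int) (a : Int × Int) : PySem.Dict (Int × Int) Int :=
  if pvInb row col grid_size a then d.insert (pvKey row col a) 0 else d
def pvStep2 (row col grid_size : Int) (d : PySem.Dict (Int × Int) Int) (a : Int × Int) : PySem.Dict (Int × Int) Int :=
  if pvGeomB a && pvInb row col grid_size a then d.insert (pvKey row col a) 1 else d

lemma offs_eq : PySem.List.pyRange (-1) 8 1 = [-1,0,1,2,3,4,5,6,7] := by decide
lemma offs7_eq : PySem.List.pyRange 0 7 1 = [0,1,2,3,4,5,6] := by decide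

lemma pvKey_inj (row col : Int) : Function.Injective (pvKey row col) := by
  intro a b h
  unfold pvKey at h
  have h1 : row + a.1 = row + b.1 := congrArg Prod.fst h
  have h2 : col + a.2 = col + b.2 := congrArg Prod.snd h
  exact Prod.ext_iff.mpr ⟨by omega, by omega⟩

lemma foldl_id {α β : Type} (l : List α) (d : β) : l.foldl (fun d _ => d) d = d := by
  induction l generalizing d with
  | nil => rfl
  | cons a l ih => simp only [List.foldl_cons]; exact ih d

-- a fold that conditionally inserts is a fold over the filtered list
lemma foldl_ite_insert {α β : Type} (p : α → Bool) (f : β → α → β) (l : List α) (d : β) :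
    l.foldl (fun d a => if p a then f d a else d) d = (l.filter p).foldl f d := by
  induction l generalizing d with
  | nil => rfl
  | cons a l ih =>
    by_cases h : p a <;> simp [h, ih]

-- nested fold = fold over the pair list
lemma foldl_pairs {β : Type} (f : β → Int × Int → β) (l₁ l₂ : List Int) (d : β) :
    l₁.foldl (fun d r => l₂.foldl (fun d c => f d (r, c)) d) d
      = (pvPairs l₁ l₂).foldl f d := by
  induction l₁ generalizing d with
  | nil => rfl
  | cons r l₁ ih =>
    simp only [List.foldl_cons, pvPairs, List.flatMap_cons, List.foldl_append, List.foldl_map]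
    exact ih _

-- overwrite pass: inserting a constant value at already-present keys rewrites values in place
lemma items_foldl_insert_overwrite {κ ν : Type} [BEq κ] [LawfulBEq κ] {α : Type}
    (l : List α) (k : α → κ) (v : ν) (d : PySem.Dict κ ν)
    (h : ∀ a ∈ l, d.contains (k a) = true) :
    (l.foldl (fun d a => d.insert (k a) v) d).items
      = d.items.map (fun p => if l.any (fun a => k a == p.1) then (p.1, v) else p) := by
  induction l generalizing d with
  | nil => simp
  | cons a l ih =>
    simp only [List.foldl_cons]
    rw [ih _ (by
      intro b hb
      rw [PySem.Dict.contains_insert]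
      simp [h b (List.mem_cons_of_mem _ hb)])]
    rw [PySem.Dict.items_insert_of_contains _ _ (h a (by simp))]
    rw [List.map_map]
    apply List.map_congr_left
    intro p _
    by_cases hpa : k a == p.1
    · have hka : k a = p.1 := by simpa using hpa
      simp [Function.comp, ← hka, List.any_cons]
    · have h1 : (k a == p.1) = false := eq_false_of_ne_true hpa
      have h2 : (p.1 == k a) = false := by
        simp only [beq_eq_false_iff_ne] at h1 ⊢
        exact fun e => h1 e.symm
      simp only [Function.comp_apply, h1, h2, List.any_cons, Bool.false_or, Bool.false_eq_true, if_false]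

lemma nodup_keys_filtered (row col grid_size : Int) :
    ((pvP81.filter (pvInb row col grid_size)).map (pvKey row col)).Nodup :=
  List.Nodup.sublist (List.Sublist.map _ List.filter_sublist)
    (List.Nodup.map (pvKey_inj row col) (by decide))

lemma pass1_items (row col grid_size : Int) :
    (((pvP81.filter (pvInb row col grid_size))).foldl
        (fun d a => d.insert (pvKey row col a) (0 : Int)) PySem.Dict.empty).items
      = (pvP81.filter (pvInb row col grid_size)).map (fun a => (pvKey row col a, (0 : Int))) := by
  rw [PySem.Dict.items_foldl_insert_fresh _ _ _ _ (by intro a _; simp)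
      (nodup_keys_filtered row col grid_size)]
  simp [PySem.Dict.empty]

lemma mem_keys_pass1 (row col grid_size : Int) (b : Int × Int)
    (hb : b ∈ pvP81.filter (pvInb row col grid_size)) :
    (((pvP81.filter (pvInb row col grid_size))).foldl
        (fun d a => d.insert (pvKey row col a) (0 : Int)) PySem.Dict.empty).contains
      (pvKey row col b) = true := by
  rw [PySem.Dict.contains_eq_decide_mem_keys]
  simp only [decide_eq_true_eq, PySem.Dict.keys, pass1_items, List.map_map]
  exact List.mem_map_of_mem hb

lemma geom_agree : ∀ a ∈ pvP81, pvGeomA a = (decide (a ∈ pvP49) && pvGeomB a) := by decide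
lemma p49_sub_p81 : ∀ a ∈ pvP49, a ∈ pvP81 := by decide

lemma A_norm (row col grid_size : Int) :
    ([-1,0,1,2,3,4,5,6,7] : List Int).foldl (fun result r =>
      if row + r ≤ -1 ∨ grid_size ≤ row + r then result
      else
        ([-1,0,1,2,3,4,5,6,7] : List Int).foldl (fun result c =>
          if col + c ≤ -1 ∨ grid_size ≤ col + c then result
          else if (0 ≤ r ∧ r ≤ 6 ∧ (c = 0 ∨ c = 6)) ∨ (0 ≤ c ∧ c ≤ 6 ∧ (r = 0 ∨ r = 6)) ∨
                  (2 ≤ r ∧ r ≤ 4 ∧ 2 ≤ c ∧ c ≤ 4) then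
            result.insert (row + r, col + c) 1
          else
            result.insert (row + r, col + c) 0) result)
      (PySem.Dict.empty : PySem.Dict (Int × Int) Int)
    = (pvP81.filter (pvInb row col grid_size)).foldl
        (fun d a => d.insert (pvKey row col a) (pvValA a)) PySem.Dict.empty := by
  have h1 :
      ([-1,0,1,2,3,4,5,6,7] : List Int).foldl (fun result r =>
        if row + r ≤ -1 ∨ grid_size ≤ row + r then result
        else
          ([-1,0,1,2,3,4,5,6,7] : List Int).foldl (fun result c =>
            if col + c ≤ -1 ∨ grid_size ≤ col + c then result
            else if (0 ≤ r ∧ r ≤ 6 ∧ (c = 0 ∨ c = 6)) ∨ (0 ≤ c ∧ c ≤ 6 ∧ (r = 0 ∨ r = 6)) ∨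
                    (2 ≤ r ∧ r ≤ 4 ∧ 2 ≤ c ∧ c ≤ 4) then
              result.insert (row + r, col + c) 1
            else
              result.insert (row + r, col + c) 0) result)
        (PySem.Dict.empty : PySem.Dict (Int × Int) Int)
      = ([-1,0,1,2,3,4,5,6,7] : List Int).foldl (fun d r =>
          ([-1,0,1,2,3,4,5,6,7] : List Int).foldl
            (fun d c => pvStepA row col grid_size d (r, c)) d)
          PySem.Dict.empty := by
    apply PySem.List.foldl_congr_mem
    intro d r _
    by_cases hr : row + r ≤ -1 ∨ grid_size ≤ row + r
    · rw [if_pos hr]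
      have hz : ∀ c : Int, ∀ d' : PySem.Dict (Int × Int) Int,
          pvStepA row col grid_size d' (r, c) = d' := by
        intro c d'
        have : pvInb row col grid_size (r, c) = false := by
          simp only [pvInb, decide_eq_false_iff_not]
          omega
        simp [pvStepA, this]
      rw [PySem.List.foldl_congr_mem _ _ (fun d _ => d) _ (by intro d' c _; exact hz c d')]
      exact (foldl_id _ d).symm
    · rw [if_neg hr]
      apply PySem.List.foldl_congr_mem
      intro d' c _
      by_cases hc : col + c ≤ -1 ∨ grid_size ≤ col + c
      · rw [if_pos hc]
        have : pvInb row col grid_size (r, c) = false := by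
          simp only [pvInb, decide_eq_false_iff_not]
          omega
        simp [pvStepA, this]
      · rw [if_neg hc]
        have hin : pvInb row col grid_size (r, c) = true := by
          simp only [pvInb, decide_eq_true_eq]
          omega
        by_cases hg : (0 ≤ r ∧ r ≤ 6 ∧ (c = 0 ∨ c = 6)) ∨ (0 ≤ c ∧ c ≤ 6 ∧ (r = 0 ∨ r = 6)) ∨
            (2 ≤ r ∧ r ≤ 4 ∧ 2 ≤ c ∧ c ≤ 4)
        · have hga : pvGeomA (r, c) = true := decide_eq_true hg
          rw [if_pos hg]
          simp [pvStepA, hin, pvValA, hga, pvKey]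
        · have hga : pvGeomA (r, c) = false := decide_eq_false hg
          rw [if_neg hg]
          simp [pvStepA, hin, pvValA, hga, pvKey]
  rw [h1, foldl_pairs]
  exact foldl_ite_insert (pvInb row col grid_size)
    (fun (d : PySem.Dict (Int × Int) Int) a => d.insert (pvKey row col a) (pvValA a)) _ _

lemma B1_norm (row col grid_size : Int) :
    ([-1,0,1,2,3,4,5,6,7] : List Int).foldl (fun result r =>
      ([-1,0,1,2,3,4,5,6,7] : List Int).foldl (fun result c =>
        if 0 ≤ row + r ∧ row + r < grid_size ∧ 0 ≤ col + c ∧ col + c < grid_size then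
          result.insert (row + r, col + c) 0
        else result) result)
      (PySem.Dict.empty : PySem.Dict (Int × Int) Int)
    = (pvP81.filter (pvInb row col grid_size)).foldl
        (fun d a => d.insert (pvKey row col a) (0 : Int)) PySem.Dict.empty := by
  have h1 :
      ([-1,0,1,2,3,4,5,6,7] : List Int).foldl (fun result r =>
        ([-1,0,1,2,3,4,5,6,7] : List Int).foldl (fun result c =>
          if 0 ≤ row + r ∧ row + r < grid_size ∧ 0 ≤ col + c ∧ col + c < grid_size then
            result.insert (row + r, col + c) 0
          else result) result)
        (PySem.Dict.empty : PySem.Dict (Int × Int) Int)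
      = ([-1,0,1,2,3,4,5,6,7] : List Int).foldl (fun d r =>
          ([-1,0,1,2,3,4,5,6,7] : List Int).foldl
            (fun d c => pvStep1 row col grid_size d (r, c)) d)
          PySem.Dict.empty := by
    apply PySem.List.foldl_congr_mem
    intro d r _
    apply PySem.List.foldl_congr_mem
    intro d' c _
    by_cases h : 0 ≤ row + r ∧ row + r < grid_size ∧ 0 ≤ col + c ∧ col + c < grid_size
    · have : pvInb row col grid_size (r, c) = true := decide_eq_true h
      simp [h, pvStep1, this, pvKey]
    · have : pvInb row col grid_size (r, c) = false := decide_eq_false h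
      simp [h, pvStep1, this]
  rw [h1, foldl_pairs]
  exact foldl_ite_insert (pvInb row col grid_size)
    (fun (d : PySem.Dict (Int × Int) Int) a => d.insert (pvKey row col a) (0 : Int)) _ _

lemma B2_norm (row col grid_size : Int) (d : PySem.Dict (Int × Int) Int) :
    ([0,1,2,3,4,5,6] : List Int).foldl (fun result r =>
      ([0,1,2,3,4,5,6] : List Int).foldl (fun result c =>
        if (r = 0 ∨ r = 6) ∨ (c = 0 ∨ c = 6) ∨ (2 ≤ r ∧ r ≤ 4 ∧ 2 ≤ c ∧ c ≤ 4) then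
          if 0 ≤ row + r ∧ row + r < grid_size ∧ 0 ≤ col + c ∧ col + c < grid_size then
            result.insert (row + r, col + c) 1
          else result
        else result) result) d
    = ((pvP49.filter (fun a => pvGeomB a && pvInb row col grid_size a))).foldl
        (fun d a => d.insert (pvKey row col a) (1 : Int)) d := by
  have h1 :
      ([0,1,2,3,4,5,6] : List Int).foldl (fun result r =>
        ([0,1,2,3,4,5,6] : List Int).foldl (fun result c =>
          if (r = 0 ∨ r = 6) ∨ (c = 0 ∨ c = 6) ∨ (2 ≤ r ∧ r ≤ 4 ∧ 2 ≤ c ∧ c ≤ 4) then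
            if 0 ≤ row + r ∧ row + r < grid_size ∧ 0 ≤ col + c ∧ col + c < grid_size then
              result.insert (row + r, col + c) 1
            else result
          else result) result) d
      = ([0,1,2,3,4,5,6] : List Int).foldl (fun d r =>
          ([0,1,2,3,4,5,6] : List Int).foldl
            (fun d c => pvStep2 row col grid_size d (r, c)) d) d := by
    apply PySem.List.foldl_congr_mem
    intro d1 r _
    apply PySem.List.foldl_congr_mem
    intro d' c _
    by_cases hg : (r = 0 ∨ r = 6) ∨ (c = 0 ∨ c = 6) ∨ (2 ≤ r ∧ r ≤ 4 ∧ 2 ≤ c ∧ c ≤ 4)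
    · have hgb : pvGeomB (r, c) = true := decide_eq_true hg
      by_cases h : 0 ≤ row + r ∧ row + r < grid_size ∧ 0 ≤ col + c ∧ col + c < grid_size
      · have hin : pvInb row col grid_size (r, c) = true := decide_eq_true h
        simp [hg, h, pvStep2, hgb, hin, pvKey]
      · have hin : pvInb row col grid_size (r, c) = false := decide_eq_false h
        simp [hg, h, pvStep2, hgb, hin]
    · have hgb : pvGeomB (r, c) = false := decide_eq_false hg
      simp [hg, pvStep2, hgb]
  rw [h1, foldl_pairs]
  exact foldl_ite_insert (fun a => pvGeomB a && pvInb row col grid_size a)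
    (fun (d : PySem.Dict (Int × Int) Int) a => d.insert (pvKey row col a) (1 : Int)) _ _

-- ===== VERDICT (by name: the statement is the Claim_ definition above) =====
theorem finder_and_seperator_pattern_generator_py_spec : Claim_equal_finder_and_seperator_pattern_generator_py := by
  intro row col grid_size _
  unfold Spec_finder_and_seperator_pattern_generator_py
  unfold finder_and_seperator_pattern_generator_py finder_and_seperator_pattern_generator_py_alt
  simp only [offs_eq, offs7_eq]
  rw [A_norm, B1_norm, B2_norm]
  congr 1
  rw [PySem.Dict.items_foldl_insert_fresh _ _ _ _ (by intro a _; simp)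
      (nodup_keys_filtered row col grid_size)]
  rw [items_foldl_insert_overwrite _ (pvKey row col) 1 _
      (by
        intro b hb
        apply mem_keys_pass1 row col grid_size
        rw [List.mem_filter] at hb ⊢
        obtain ⟨hb1, hb2⟩ := hb
        rw [Bool.and_eq_true] at hb2
        exact ⟨p49_sub_p81 b hb1, hb2.2⟩)]
  rw [pass1_items, List.map_map]
  simp only [PySem.Dict.empty, List.nil_append]
  apply List.map_congr_left
  intro a ha
  rw [List.mem_filter] at ha
  obtain ⟨ha81, hainb⟩ := ha
  simp only [Function.comp]
  by_cases hblk : List.any (pvP49.filter (fun b => pvGeomB b && pvInb row col grid_size b))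
      (fun b => pvKey row col b == (pvKey row col a, (0 : Int)).1) = true
  · rw [if_pos hblk]
    rw [List.any_eq_true] at hblk
    obtain ⟨b, hbmem, hbeq⟩ := hblk
    have hba : b = a := pvKey_inj row col (by simpa using hbeq)
    subst hba
    rw [List.mem_filter, Bool.and_eq_true] at hbmem
    have hga : pvGeomA b = true := by
      rw [geom_agree b ha81]
      simp [hbmem.1, hbmem.2.1]
    simp [pvValA, hga]
  · rw [if_neg hblk]
    have hga : pvGeomA a = false := by
      rw [geom_agree a ha81]
      by_cases h49 : a ∈ pvP49
      · simp only [h49, decide_true, Bool.true_and]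
        by_contra hgb
        apply hblk
        rw [List.any_eq_true]
        refine ⟨a, ?_, by simp⟩
        rw [List.mem_filter, Bool.and_eq_true]
        exact ⟨h49, Bool.of_not_eq_false hgb, hainb⟩
      · simp [h49]
    simp [pvValA, hga]
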